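-- pv_equiv track=rewrite | github.com/thomasdelmoro21/Astar_disjointPatternDatabases | Heuristics.py | searchConflicts
-- ===== SOURCE A (Python) =====
-- def searchConflicts(list):
--     conflicts = 0
--     for i in range(len(list) - 1):
--         value = list[i]
--         if value != 0:
--             for j in range(i + 1, len(list)):
--                 if list[i] > list[j]:
--                     conflicts += 1
--                     break
--     return conflicts
-- ===== SOURCE B (Python) =====
-- def searchConflicts(list):
--     conflicts = 0
--     suffix_min = None
--     for v in reversed(list):
--         if suffix_min is not None and v != 0 and v > suffix_min:
--             conflicts += 1
--         suffix_min = v if suffix_min is None else min(suffix_min, v)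
--     return conflicts
-- ===== Notes on version B (the rewrite author's own statement) =====
-- stated objective: faster
-- what changed: Replaced the nested scan (for each element, scan the rest for a smaller one) by a single backward pass that maintains the suffix minimum and compares each nonzero element against it.
import Mathlib
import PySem

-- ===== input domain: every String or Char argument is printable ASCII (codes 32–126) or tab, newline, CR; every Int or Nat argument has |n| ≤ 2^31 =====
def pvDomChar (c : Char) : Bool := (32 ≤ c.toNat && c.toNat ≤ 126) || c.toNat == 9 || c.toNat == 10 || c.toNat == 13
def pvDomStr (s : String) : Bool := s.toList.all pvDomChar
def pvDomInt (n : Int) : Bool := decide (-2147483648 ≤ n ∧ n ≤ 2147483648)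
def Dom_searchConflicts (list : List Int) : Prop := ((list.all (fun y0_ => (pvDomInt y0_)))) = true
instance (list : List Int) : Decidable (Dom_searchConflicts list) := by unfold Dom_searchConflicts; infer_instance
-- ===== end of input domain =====

-- B replaces A's nested quadratic scan by one backward pass tracking the suffix minimum (objective: faster, asymptotic).

-- ===== PORT A =====
-- inner Python loop 'for j in range(i+1, len(list)): if list[i] > list[j]: …; break'
def innerA (list : List Int) (v : Int) : List Int → Bool
  | [] => false
  | j :: js => if v > PySem.List.pyGetD list j 0 then true else innerA list v js

-- outer Python loop over i with accumulator 'conflicts'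
def outerA (list : List Int) : List Int → Int → Int
  | [], c => c
  | i :: is, c =>
    let value := PySem.List.pyGetD list i 0
    if value ≠ 0 then
      if innerA list value (PySem.List.pyRange (i + 1) (list.length : Int) 1) then
        outerA list is (c + 1)
      else
        outerA list is c
    else
      outerA list is c

def searchConflicts (list : List Int) : Int :=
  outerA list (PySem.List.pyRange 0 ((list.length : Int) - 1) 1) 0

-- ===== PORT B =====
-- one step of B's backward pass: state = (conflicts, suffix minimum so far or none)
def stepB (st : Int × Option Int) (v : Int) : Int × Option Int :=
  let c :=
    match st.2 with
    | some m => if v ≠ 0 ∧ v > m then st.1 + 1 else st.1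
    | none => st.1
  let m' :=
    match st.2 with
    | none => v
    | some m => min m v
  (c, some m')

def searchConflicts_alt (list : List Int) : Int :=
  (list.reverse.foldl stepB (0, none)).1

-- ===== PRECONDITION & SPEC =====
def Spec_searchConflicts (list : List Int) (out : Int) : Prop := out = searchConflicts_alt list
instance (list : List Int) (out : Int) : Decidable (Spec_searchConflicts list out) := by unfold Spec_searchConflicts; infer_instance

-- ===== CLAIM (what is proved, stated in full; the proofs are below) =====
def Claim_equal_searchConflicts : Prop := ∀ (list : List Int), Dom_searchConflicts list → Spec_searchConflicts list (searchConflicts list)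

-- ===== LEMMAS AND PROOFS =====

-- the common value: number of elements that are nonzero and have a strictly smaller later element
def count : List Int → Int
  | [] => 0
  | x :: xs => (if x ≠ 0 ∧ xs.any (fun y => decide (x > y)) = true then 1 else 0) + count xs

def minOpt : List Int → Option Int
  | [] => none
  | x :: xs =>
    some (match minOpt xs with
          | none => x
          | some m => min m x)

lemma innerA_eq_any (list : List Int) (v : Int) (js : List Int) :
    innerA list v js = js.any (fun j => decide (v > PySem.List.pyGetD list j 0)) := by
  induction js with
  | nil => simp [innerA]
  | cons j js ih => by_cases h : v > PySem.List.pyGetD list j 0 <;> simp [innerA, h, ih]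

lemma inner_drop (list : List Int) (v : Int) (a : Int) (ha : 0 ≤ a) :
    innerA list v (PySem.List.pyRange a (list.length : Int) 1)
      = (list.drop a.toNat).any (fun y => decide (v > y)) := by
  rw [innerA_eq_any, ← PySem.List.map_pyGetD_pyRange' list 0 ha, List.any_map]
  rfl

lemma outerA_main : ∀ (xs pre : List Int) (c : Int),
    outerA (pre ++ xs) (PySem.List.pyRange (pre.length : Int) ((pre.length : Int) + (xs.length : Int) - 1) 1) c
      = c + count xs := by
  intro xs
  induction xs with
  | nil => intro pre c; rw [PySem.List.pyRange_one_eq_nil (by simp)]; simp [outerA, count]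
  | cons x t ih =>
    intro pre c
    by_cases ht : t = []
    · subst ht
      rw [PySem.List.pyRange_one_eq_nil (by simp)]
      simp [outerA, count]
    · have hlen : 1 ≤ t.length := by
        cases t
        · exact absurd rfl ht
        · simp
      rw [PySem.List.pyRange_one_cons (by push_cast [List.length_cons]; omega)]
      have hv : PySem.List.pyGetD (pre ++ x :: t) ((pre.length : Int)) 0 = x := by
        simp
      have hin : innerA (pre ++ x :: t) x
          (PySem.List.pyRange ((pre.length : Int) + 1) (((pre ++ x :: t).length : Int)) 1)
          = t.any (fun y => decide (x > y)) := by
        rw [inner_drop _ _ _ (by positivity)]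
        congr 1
        rw [show ((pre.length : Int) + 1).toNat = (pre ++ [x]).length by simp,
            show pre ++ x :: t = (pre ++ [x]) ++ t by simp, List.drop_left]
      have ih' : ∀ c' : Int,
          outerA (pre ++ x :: t)
            (PySem.List.pyRange ((pre.length : Int) + 1) ((pre.length : Int) + ((x :: t).length : Int) - 1) 1) c'
          = c' + count t := by
        intro c'
        have h := ih (pre ++ [x]) c'
        simp only [List.append_assoc, List.singleton_append, List.length_append, List.length_cons] at h ⊢
        push_cast at h ⊢
        rw [show (pre.length : Int) + (t.length + 1) - 1 = (pre.length : Int) + 1 + t.length - 1 by ring]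
        exact h
      simp only [outerA, hv, hin]
      by_cases hx : x = 0
      · rw [if_neg (by simp [hx]), ih' c]
        simp [count, hx]
      · by_cases hany : t.any (fun y => decide (x > y)) = true
        · rw [if_pos (by simp [hx]), if_pos hany, ih' (c + 1)]
          simp [count, hx, hany]
          omega
        · rw [if_pos (by simp [hx]), if_neg hany, ih' c]
          simp [count, hx, hany]

lemma searchConflicts_eq_count (list : List Int) : searchConflicts list = count list := by
  have h := outerA_main list [] 0
  simpa [searchConflicts] using h

lemma minOpt_eq_none (xs : List Int) (h : minOpt xs = none) : xs = [] := by
  cases xs with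
  | nil => rfl
  | cons x t => simp [minOpt] at h

lemma minOpt_spec : ∀ (xs : List Int) (m : Int), minOpt xs = some m → m ∈ xs ∧ ∀ y ∈ xs, m ≤ y := by
  intro xs
  induction xs with
  | nil => intro m hm; simp [minOpt] at hm
  | cons x t ih =>
    intro m hm
    cases ht : minOpt t with
    | none =>
      have := minOpt_eq_none t ht
      subst this
      simp [minOpt] at hm
      subst hm
      simp
    | some mt =>
      obtain ⟨hmem, hle⟩ := ih mt ht
      simp [minOpt, ht] at hm
      subst hm
      constructor
      · rcases le_total mt x with h | h
        · rw [min_eq_left h]; exact List.mem_cons_of_mem _ hmem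
        · rw [min_eq_right h]; exact List.mem_cons_self
      · intro y hy
        rcases List.mem_cons.mp hy with rfl | hy
        · exact min_le_right _ _
        · exact le_trans (min_le_left _ _) (hle y hy)

lemma any_iff_min (x : Int) (xs : List Int) (m : Int) (h : minOpt xs = some m) :
    (xs.any (fun y => decide (x > y)) = true) ↔ x > m := by
  obtain ⟨hmem, hle⟩ := minOpt_spec xs m h
  simp only [List.any_eq_true, decide_eq_true_eq]
  constructor
  · rintro ⟨y, hy, hxy⟩; exact lt_of_le_of_lt (hle y hy) hxy
  · intro hxm; exact ⟨m, hmem, hxm⟩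

lemma foldB_reverse : ∀ (xs : List Int) (c : Int),
    xs.reverse.foldl stepB (c, none) = (c + count xs, minOpt xs) := by
  intro xs
  induction xs with
  | nil => intro c; simp [count, minOpt]
  | cons x t ih =>
    intro c
    rw [List.reverse_cons, List.foldl_append, ih c]
    cases ht : minOpt t with
    | none =>
      have := minOpt_eq_none t ht
      subst this
      simp [stepB, count, minOpt]
    | some m =>
      simp only [List.foldl_cons, List.foldl_nil, stepB, minOpt, ht, count]
      by_cases hx : x = 0
      · simp [hx]
      · by_cases hxm : x > m
        · have hany : (t.any (fun y => decide (x > y)) = true) := (any_iff_min x t m ht).mpr hxm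
          simp [hx, hxm, hany]
          omega
        · have hany : ¬ (t.any (fun y => decide (x > y)) = true) := fun h => hxm ((any_iff_min x t m ht).mp h)
          simp [hx, hxm, hany]

lemma alt_eq_count (list : List Int) : searchConflicts_alt list = count list := by
  simp [searchConflicts_alt, foldB_reverse list 0]

-- ===== VERDICT (by name: the statement is the Claim_ definition above) =====
theorem searchConflicts_spec : Claim_equal_searchConflicts := by
  intro list _
  unfold Spec_searchConflicts
  rw [searchConflicts_eq_count, alt_eq_count]
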